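-- pv_equiv track=rewrite | github.com/CROCODILE-CESM/CrocoCamp | crococamp/utils/namelist.py | _find_section_end
-- ===== SOURCE A (Python) =====
-- from typing import Union, List
--
-- def _find_section_end(lines: List[str], section_name: str) -> int:
--     """Find the end line number of a section."""
--     in_section = False
--     for i, line in enumerate(lines):
--         stripped = line.strip()
--         if stripped.startswith(f'&{section_name}'):
--             in_section = True
--             continue
--         if in_section and stripped == '/':
--             return i
--     return None
-- ===== SOURCE B (Python) =====
-- def _find_section_end(lines, section_name):
--     """Find the end line number of a section, by a single backward pass.
--
--     Tupled right fold: for the suffix starting at i we keep the answer the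
--     scan would give if we were already inside the section (ans_in) and if we
--     were still searching for the header (ans_out); return the latter for the
--     whole list.  No carried in_section flag, no forward search.
--     """
--     header = '&' + section_name
--     ans_in = ans_out = None
--     for i in range(len(lines) - 1, -1, -1):
--         s = lines[i].strip()
--         if s.startswith(header):
--             ans_out = ans_in       # a header switches the searching mode into the section
--         elif s == '/':
--             ans_in = i             # inside the section, this line is the answer
--     return ans_out
-- ===== Notes on version B (the rewrite author's own statement) =====
-- stated objective: alternative
-- what changed: Replaced A's forward scan carrying an in_section flag by a single backward pass (tupled right fold) that computes, for every suffix, the answer in both 'inside the section' and 'still searching' modes and returns the searching-mode answer.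
import Mathlib
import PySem

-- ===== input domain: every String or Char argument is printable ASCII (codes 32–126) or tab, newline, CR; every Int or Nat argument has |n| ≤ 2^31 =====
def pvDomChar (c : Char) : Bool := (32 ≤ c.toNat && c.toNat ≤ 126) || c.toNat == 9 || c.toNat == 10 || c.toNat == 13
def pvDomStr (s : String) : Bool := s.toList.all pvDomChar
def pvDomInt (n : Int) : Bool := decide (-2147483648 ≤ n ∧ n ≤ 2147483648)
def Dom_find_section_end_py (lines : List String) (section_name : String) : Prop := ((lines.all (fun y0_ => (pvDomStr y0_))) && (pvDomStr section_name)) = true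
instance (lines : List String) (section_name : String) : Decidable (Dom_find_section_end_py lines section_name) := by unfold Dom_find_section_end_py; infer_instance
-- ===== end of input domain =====

-- B replaces A's forward scan with an in_section flag by one backward pass
-- (a tupled right fold over the lines); an alternative decomposition of equal cost.

-- ===== PORT A =====
-- A's loop: enumerate forward with the carried in_section flag, branches in source order
def pvGoA (name : String) : List String → Int → Bool → Option Int
  | [], _, _ => none
  | l :: rest, i, inSec =>
    let stripped := PySem.Str.strip l
    if PySem.Str.startswith stripped ("&" ++ name) then pvGoA name rest (i + 1) true
    else if inSec && (stripped == "/") then some i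
    else pvGoA name rest (i + 1) inSec

def find_section_end_py (lines : List String) (section_name : String) : Option Int :=
  pvGoA section_name lines 0 false

-- ===== PORT B =====
-- B's backward pass: for the suffix starting at index i, return the pair
-- (answer if already inside the section, answer if still searching)
def pvGoB (name : String) : List String → Int → Option Int × Option Int
  | [], _ => (none, none)
  | l :: rest, i =>
    let p := pvGoB name rest (i + 1)
    let s := PySem.Str.strip l
    if PySem.Str.startswith s ("&" ++ name) then (p.1, p.1)
    else if s == "/" then (some i, p.2)
    else p

def find_section_end_py_alt (lines : List String) (section_name : String) : Option Int :=
  (pvGoB section_name lines 0).2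

-- ===== PRECONDITION & SPEC =====
def Spec_find_section_end_py (lines : List String) (section_name : String) (out : Option Int) : Prop := out = find_section_end_py_alt lines section_name
instance (lines : List String) (section_name : String) (out : Option Int) : Decidable (Spec_find_section_end_py lines section_name out) := by unfold Spec_find_section_end_py; infer_instance

-- ===== CLAIM (what is proved, stated in full; the proofs are below) =====
def Claim_equal_find_section_end_py : Prop := ∀ (lines : List String) (section_name : String), Dom_find_section_end_py lines section_name → Spec_find_section_end_py lines section_name (find_section_end_py lines section_name)

-- ===== LEMMAS AND PROOFS =====

-- A's forward loop in either flag state computes the corresponding component of B's pair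
lemma pvGoA_eq_pvGoB (name : String) :
    ∀ (lines : List String) (i : Int),
      pvGoA name lines i true = (pvGoB name lines i).1 ∧
      pvGoA name lines i false = (pvGoB name lines i).2 := by
  intro lines
  induction lines with
  | nil => intro i; simp [pvGoA, pvGoB]
  | cons l rest ih =>
    intro i
    obtain ⟨h1, h2⟩ := ih (i + 1)
    simp only [pvGoA, pvGoB]
    by_cases hp : PySem.Chars.startswith (PySem.Chars.strip l.toList) ('&' :: name.toList) = true
    · simp [hp, h1]
    · by_cases hq : PySem.Str.strip l = "/"
      · simp [hq, h2, PySem.Chars.startswith]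
      · simp [hp, hq, h1, h2]

-- ===== VERDICT (by name: the statement is the Claim_ definition above) =====
theorem find_section_end_py_spec : Claim_equal_find_section_end_py := by
  intro lines name _
  unfold Spec_find_section_end_py find_section_end_py find_section_end_py_alt
  exact (pvGoA_eq_pvGoB name lines 0).2
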